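-- pv_equiv track=rewrite | github.com/Muneeb312/StudyBuddy | studybuddy/safety.py | is_prompt_injection
-- ===== SOURCE A (Python) =====
-- def is_prompt_injection(prompt):
--     """
--     Checks for prompt injection attempts.
--     """
--     injection_phrases = [
--         "ignore previous instructions",
--         "override system",
--         "you are no longer",
--         "disregard the rules",
--     ]
--     for phrase in injection_phrases:
--         if phrase in prompt.lower():
--             return True
--     return False
-- ===== SOURCE B (Python) =====
-- _BY_FIRST = {
--     "i": "ignore previous instructions",
--     "o": "override system",
--     "y": "you are no longer",
--     "d": "disregard the rules",
-- }
--
--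
-- def is_prompt_injection(prompt):
--     """
--     Checks for prompt injection attempts.
--     """
--     s = prompt.lower()
--     for i, ch in enumerate(s):
--         p = _BY_FIRST.get(ch)
--         if p is not None and s.startswith(p, i):
--             return True
--     return False
-- ===== Notes on version B (the rewrite author's own statement) =====
-- stated objective: alternative
-- what changed: Replaces A's per-phrase loop of full substring scans with one left-to-right scan that dispatches each character through a first-letter-to-phrase dict (the four phrases start with distinct letters) and verifies at most one candidate phrase per position.
import Mathlib
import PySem

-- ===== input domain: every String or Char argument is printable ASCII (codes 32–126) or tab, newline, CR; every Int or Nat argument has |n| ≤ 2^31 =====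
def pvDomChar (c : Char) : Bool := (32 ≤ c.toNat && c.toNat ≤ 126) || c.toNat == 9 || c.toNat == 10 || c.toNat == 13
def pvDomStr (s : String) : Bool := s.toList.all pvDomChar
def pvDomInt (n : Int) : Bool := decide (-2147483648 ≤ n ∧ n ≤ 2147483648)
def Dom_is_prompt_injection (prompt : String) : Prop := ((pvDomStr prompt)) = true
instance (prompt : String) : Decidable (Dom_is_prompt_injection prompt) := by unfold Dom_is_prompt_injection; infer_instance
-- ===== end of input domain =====

-- B replaces A's per-phrase loop of substring scans with one left-to-right scan dispatching each character through a first-letter→phrase dict (alternative decomposition, same result).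


-- ===== PORT A =====
-- Port of A: loop over the phrase list, early-return True when 'phrase in prompt.lower()'.
def pvAloop (low : String) : List String → Bool
  | [] => false
  | p :: rest => if PySem.Str.isIn p low then true else pvAloop low rest

def is_prompt_injection (prompt : String) : Bool :=
  pvAloop (PySem.Str.lower prompt)
    ["ignore previous instructions", "override system", "you are no longer",
     "disregard the rules"]

-- ===== PORT B =====
-- Port of B: the module-level dict _BY_FIRST mapping each phrase's (distinct) first letter to the phrase.
def pvByFirst : PySem.Dict Char String :=
  PySem.Dict.ofList
    [('i', "ignore previous instructions"), ('o', "override system"),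
     ('y', "you are no longer"), ('d', "disregard the rules")]

-- 'for i, ch in enumerate(s): p = _BY_FIRST.get(ch); if p is not None and s.startswith(p, i): return True'.
-- The enumerate loop visits the characters left to right; s.startswith(p, i) (0 ≤ i) is exactly
-- 'p is a prefix of the suffix s[i:]'; the structural recursion walks the same suffixes in order.
def pvDispatchScan : List Char → Bool
  | [] => false
  | c :: rest =>
    match PySem.Dict.get? pvByFirst c with
    | some p => if PySem.Chars.startswith (c :: rest) p.toList then true else pvDispatchScan rest
    | none => pvDispatchScan rest

def is_prompt_injection_alt (prompt : String) : Bool :=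
  pvDispatchScan (PySem.Str.lower prompt).toList

-- ===== PRECONDITION & SPEC =====
def Spec_is_prompt_injection (prompt : String) (out : Bool) : Prop := out = is_prompt_injection_alt prompt
instance (prompt : String) (out : Bool) : Decidable (Spec_is_prompt_injection prompt out) := by unfold Spec_is_prompt_injection; infer_instance

-- ===== CLAIM (what is proved, stated in full; the proofs are below) =====
def Claim_equal_is_prompt_injection : Prop := ∀ (prompt : String), Dom_is_prompt_injection prompt → Spec_is_prompt_injection prompt (is_prompt_injection prompt)

-- ===== LEMMAS AND PROOFS =====

def pvPhrases : List String :=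
  ["ignore previous instructions", "override system", "you are no longer",
   "disregard the rules"]

-- A's early-return loop is the disjunction of the per-phrase membership tests.
theorem pv_aloop_eq_any (low : String) (ps : List String) :
    pvAloop low ps = ps.any (fun p => PySem.Str.isIn p low) := by
  induction ps with
  | nil => rfl
  | cons p rest ih =>
    simp only [pvAloop, List.any_cons, ih]
    cases PySem.Str.isIn p low <;> simp

-- One step of a suffix scan: sub occurs in c :: rest iff it starts there or occurs in rest.
theorem pv_isIn_cons (p : List Char) (c : Char) (rest : List Char) :
    PySem.Chars.isIn p (c :: rest)
      = (PySem.Chars.startswith (c :: rest) p || PySem.Chars.isIn p rest) := by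
  rw [Bool.eq_iff_iff]
  simp only [PySem.Chars.isIn_iff_infix, Bool.or_eq_true, PySem.Chars.startswith_iff,
    PySem.Chars.isIn_iff_infix, List.infix_cons_iff]

theorem pv_startswith_cons (c d : Char) (rest tl : List Char) :
    PySem.Chars.startswith (c :: rest) (d :: tl)
      = ((d == c) && PySem.Chars.startswith rest tl) := by
  rw [Bool.eq_iff_iff]
  simp only [PySem.Chars.startswith_iff, List.cons_prefix_cons, Bool.and_eq_true, beq_iff_eq]

-- The dict dispatch at one position equals testing all four phrases there:
-- the phrases' first letters are distinct, and a phrase can only start at a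
-- position holding its own first letter.
theorem pvByFirst_eq :
    pvByFirst = PySem.Dict.mk
      [('i', "ignore previous instructions"), ('o', "override system"),
       ('y', "you are no longer"), ('d', "disregard the rules")] := by decide

set_option maxRecDepth 8000 in
theorem pv_dispatch_step (c : Char) (rest : List Char) :
    (match PySem.Dict.get? pvByFirst c with
     | some p => PySem.Chars.startswith (c :: rest) p.toList
     | none => false)
      = pvPhrases.any (fun p => PySem.Chars.startswith (c :: rest) p.toList) := by
  rw [pvByFirst_eq]
  by_cases hi : c = 'i'
  · subst hi; simp [PySem.Dict.get?_mk_cons, pvPhrases, pv_startswith_cons]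
  · by_cases ho : c = 'o'
    · subst ho; simp [PySem.Dict.get?_mk_cons, pvPhrases, pv_startswith_cons]
    · by_cases hy : c = 'y'
      · subst hy; simp [PySem.Dict.get?_mk_cons, pvPhrases, pv_startswith_cons]
      · by_cases hd : c = 'd'
        · subst hd; simp [PySem.Dict.get?_mk_cons, pvPhrases, pv_startswith_cons]
        · have hget : (PySem.Dict.mk
              [('i', "ignore previous instructions"), ('o', "override system"),
               ('y', "you are no longer"), ('d', "disregard the rules")]).get? c = none := by
            simp [PySem.Dict.get?, beq_iff_eq, Ne.symm hi, Ne.symm ho, Ne.symm hy, Ne.symm hd]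
          rw [hget]
          simp [pvPhrases, pv_startswith_cons, Ne.symm hi, Ne.symm ho, Ne.symm hy, Ne.symm hd]

theorem pv_any_or {α : Type} (l : List α) (f g : α → Bool) :
    (l.any fun x => f x || g x) = (l.any f || l.any g) := by
  induction l with
  | nil => rfl
  | cons x xs ih => simp [ih, Bool.or_assoc, Bool.or_left_comm]

-- B's dispatch scan computes the disjunction of the per-phrase membership tests.
theorem pv_scan_eq_any (s : List Char) :
    pvDispatchScan s = pvPhrases.any (fun p => PySem.Chars.isIn p.toList s) := by
  induction s with
  | nil => decide
  | cons c rest ih =>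
    have hstep : (pvPhrases.any fun p => PySem.Chars.isIn p.toList (c :: rest))
        = ((pvPhrases.any fun p => PySem.Chars.startswith (c :: rest) p.toList)
            || pvPhrases.any fun p => PySem.Chars.isIn p.toList rest) := by
      rw [← pv_any_or]
      exact congrArg _ (funext fun p => pv_isIn_cons p.toList c rest)
    rw [hstep, ← pv_dispatch_step]
    unfold pvDispatchScan
    cases hg : PySem.Dict.get? pvByFirst c with
    | none => simpa using ih
    | some p =>
      cases hsw : PySem.Chars.startswith (c :: rest) p.toList <;> simp [hsw, ih]

-- ===== VERDICT (by name: the statement is the Claim_ definition above) =====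
theorem is_prompt_injection_spec : Claim_equal_is_prompt_injection := by
  intro prompt _
  unfold Spec_is_prompt_injection is_prompt_injection is_prompt_injection_alt
  rw [pv_aloop_eq_any, pv_scan_eq_any]
  simp only [pvPhrases, PySem.Str.isIn_eq]
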